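-- pv_equiv track=rewrite | github.com/parasiitism/AlgoDaily | leetcode/1989-maximum-number-of-people-that-can-be-caught-in-tag/main.py | catchAllPeople
-- ===== SOURCE A (Python) =====
-- from typing import List
--
-- from collections import deque
--
-- def catchAllPeople(team: List[int], dist: int) -> int:
--     n = len(team)
--     zeros = deque()
--     for i in range(n):
--         if team[i] == 0:
--             zeros.append(i)
--     res = 0
--     for i in range(n):
--         if team[i] == 0:
--             continue
--         while len(zeros) > 0 and zeros[0] < i-dist:
--             zeros.popleft()
--         if len(zeros) > 0 and zeros[0] <= i+dist:
--             zeros.popleft()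
--             res += 1
--     return res
-- ===== SOURCE B (Python) =====
-- from typing import List
--
-- def catchAllPeople(team: List[int], dist: int) -> int:
--     ones = [i for i, t in enumerate(team) if t != 0]
--     zeros = [i for i, t in enumerate(team) if t == 0]
--     i = j = res = 0
--     while i < len(ones) and j < len(zeros):
--         if zeros[j] < ones[i] - dist:
--             j += 1
--         elif zeros[j] > ones[i] + dist:
--             i += 1
--         else:
--             res += 1
--             i += 1
--             j += 1
--     return res
-- ===== Notes on version B (the rewrite author's own statement) =====
-- stated objective: alternative
-- what changed: A scans all n indices keeping a deque window of zero-positions; B precomputes the sorted ones/zeros position lists and counts matches with a classic two-pointer merge over the two lists.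
import Mathlib
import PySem

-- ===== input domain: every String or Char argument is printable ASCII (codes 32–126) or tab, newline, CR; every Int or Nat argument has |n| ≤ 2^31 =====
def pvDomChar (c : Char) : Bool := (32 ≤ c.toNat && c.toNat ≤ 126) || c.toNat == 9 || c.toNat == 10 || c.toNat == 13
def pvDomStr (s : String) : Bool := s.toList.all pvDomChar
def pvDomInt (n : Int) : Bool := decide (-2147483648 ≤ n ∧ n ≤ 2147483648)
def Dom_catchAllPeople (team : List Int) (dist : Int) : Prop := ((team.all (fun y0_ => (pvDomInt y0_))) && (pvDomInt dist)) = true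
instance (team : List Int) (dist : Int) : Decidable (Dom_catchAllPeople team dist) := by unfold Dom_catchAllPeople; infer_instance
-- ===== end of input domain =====

-- B replaces A's index scan with a deque window by a two-pointer merge over the
-- precomputed ones/zeros position lists (alternative decomposition, same O(n) cost).


-- ===== PORT A =====
-- the inner `while len(zeros) > 0 and zeros[0] < i-dist: zeros.popleft()`
def pvWhileDrop (dist i : Int) : List Int → List Int
  | [] => []
  | z :: zs => if z < i - dist then pvWhileDrop dist i zs else z :: zs

-- body of the second loop for a tagger index i: drop stale zeros, then maybe match
def pvStepA (dist : Int) (st : List Int × Int) (i : Int) : List Int × Int :=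
  match pvWhileDrop dist i st.1 with
  | [] => ([], st.2)
  | z :: rest => if z ≤ i + dist then (rest, st.2 + 1) else (z :: rest, st.2)

def catchAllPeople (team : List Int) (dist : Int) : Int :=
  let n : Int := PySem.List.len team
  let zeros : List Int := (PySem.List.pyRange 0 n 1).foldl
    (fun acc i => if PySem.List.pyGetD team i 0 = 0 then acc ++ [i] else acc) []
  let fin := (PySem.List.pyRange 0 n 1).foldl
    (fun st i => if PySem.List.pyGetD team i 0 = 0 then st else pvStepA dist st i) (zeros, 0)
  fin.2

-- ===== PORT B =====
-- the two-pointer `while i < len(ones) and j < len(zeros)` loop; advancing a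
-- pointer past the head of a list is taking its tail
def pvMerge (dist : Int) : List Int → List Int → Int
  | [], _ => 0
  | _ :: _, [] => 0
  | o :: os, z :: zs =>
    if z < o - dist then pvMerge dist (o :: os) zs
    else if z > o + dist then pvMerge dist os (z :: zs)
    else 1 + pvMerge dist os zs
termination_by a b => a.length + b.length

def catchAllPeople_alt (team : List Int) (dist : Int) : Int :=
  let ones := (PySem.List.enumerate team).filterMap (fun p => if p.2 ≠ 0 then some p.1 else none)
  let zeros := (PySem.List.enumerate team).filterMap (fun p => if p.2 = 0 then some p.1 else none)
  pvMerge dist ones zeros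

-- ===== PRECONDITION & SPEC =====
def Spec_catchAllPeople (team : List Int) (dist : Int) (out : Int) : Prop := out = catchAllPeople_alt team dist
instance (team : List Int) (dist : Int) (out : Int) : Decidable (Spec_catchAllPeople team dist out) := by unfold Spec_catchAllPeople; infer_instance

-- ===== CLAIM (what is proved, stated in full; the proofs are below) =====
def Claim_equal_catchAllPeople : Prop := ∀ (team : List Int) (dist : Int), Dom_catchAllPeople team dist → Spec_catchAllPeople team dist (catchAllPeople team dist)

-- ===== LEMMAS AND PROOFS =====

theorem pvMerge_nil_right (dist : Int) (os : List Int) : pvMerge dist os [] = 0 := by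
  cases os <;> simp [pvMerge]

-- one tagger step of A accounts for exactly what pvMerge does at the head
theorem pvStep_merge (dist o : Int) (os : List Int) :
    ∀ (zeros : List Int) (res : Int),
      res + pvMerge dist (o :: os) zeros
        = (pvStepA dist (zeros, res) o).2 + pvMerge dist os (pvStepA dist (zeros, res) o).1 := by
  intro zeros
  induction zeros with
  | nil =>
    intro res
    simp [pvStepA, pvWhileDrop, pvMerge_nil_right]
  | cons z zs ih =>
    intro res
    by_cases h1 : z < o - dist
    · have hstep : pvStepA dist (z :: zs, res) o = pvStepA dist (zs, res) o := by
        simp [pvStepA, pvWhileDrop, h1]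
      rw [hstep]
      have : pvMerge dist (o :: os) (z :: zs) = pvMerge dist (o :: os) zs := by
        simp [pvMerge, h1]
      rw [this]; exact ih res
    · by_cases h2 : z > o + dist
      · have hle : ¬ z ≤ o + dist := by omega
        have hstep : pvStepA dist (z :: zs, res) o = (z :: zs, res) := by
          simp [pvStepA, pvWhileDrop, h1, hle]
        rw [hstep]
        simp [pvMerge, h1, h2]
      · have hle : z ≤ o + dist := by omega
        have hstep : pvStepA dist (z :: zs, res) o = (zs, res + 1) := by
          simp [pvStepA, pvWhileDrop, h1, hle]
        rw [hstep]
        simp [pvMerge, h1, h2]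
        omega

theorem pvFold_merge (dist : Int) :
    ∀ (ones zeros : List Int) (res : Int),
      (List.foldl (pvStepA dist) (zeros, res) ones).2 = res + pvMerge dist ones zeros := by
  intro ones
  induction ones with
  | nil => intro zeros res; simp [pvMerge]
  | cons o os ih =>
    intro zeros res
    have := pvStep_merge dist o os zeros res
    simp only [List.foldl_cons]
    rw [show pvStepA dist (zeros, res) o
          = ((pvStepA dist (zeros, res) o).1, (pvStepA dist (zeros, res) o).2) from rfl,
        ih]
    omega

-- A's skip-on-zero scan over an index list is the plain fold over the kept indices
theorem pvFold_skip (team : List Int) (dist : Int) :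
    ∀ (l : List Int) (st : List Int × Int),
      List.foldl (fun st i => if PySem.List.pyGetD team i 0 = 0 then st else pvStepA dist st i) st l
        = List.foldl (pvStepA dist) st
            (l.filterMap (fun i => if PySem.List.pyGetD team i 0 ≠ 0 then some i else none)) := by
  intro l
  induction l with
  | nil => intro st; rfl
  | cons i l ih =>
    intro st
    by_cases h : PySem.List.pyGetD team i 0 = 0 <;> simp [h, ih]

-- A's first loop builds the same zeros list B's comprehension builds
theorem pvFold_zeros (team : List Int) :
    ∀ (l : List Int) (acc : List Int),
      List.foldl (fun acc i => if PySem.List.pyGetD team i 0 = 0 then acc ++ [i] else acc) acc l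
        = acc ++ l.filterMap (fun i => if PySem.List.pyGetD team i 0 = 0 then some i else none) := by
  intro l
  induction l with
  | nil => intro acc; simp
  | cons i l ih =>
    intro acc
    by_cases h : PySem.List.pyGetD team i 0 = 0 <;> simp [h, ih]

-- ===== VERDICT (by name: the statement is the Claim_ definition above) =====
theorem catchAllPeople_spec : Claim_equal_catchAllPeople := by
  intro team dist _
  unfold Spec_catchAllPeople catchAllPeople catchAllPeople_alt
  rw [PySem.List.enumerate_eq_map_pyRange (d := 0), List.filterMap_map, List.filterMap_map]
  simp only [Function.comp]
  rw [pvFold_zeros, pvFold_skip, pvFold_merge]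
  simp
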